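-- pv_equiv track=rewrite | github.com/datacommonsorg/data | scripts/us_census/acs5yr/subject_tables/common/helper_functions.py | column_find_prefixed
-- ===== SOURCE A (Python) =====
-- def column_find_prefixed(column_name: str, prefix_list: list) -> str:
--     """Filter out columns that are begin with one of the strings from a given prefix list.
--       NOTE: Longest prefix would be used in case multiple matches occour.
--
--     Args:
--       column_name: Name of the column to be checked.
--       prefix_list: List of possible prefix.
--
--     Returns:
--       The longest matching prefix or None if no match is found.
--   """
--     matched_prefix = None
--     if column_name not in prefix_list:
--         for cur_prefix in prefix_list:
--             if len(cur_prefix) < len(column_name) and cur_prefix in column_name: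
--                 if matched_prefix:
--                     if len(cur_prefix) > len(matched_prefix):
--                         matched_prefix = cur_prefix
--                 else:
--                     matched_prefix = cur_prefix
--
--     return matched_prefix
-- ===== SOURCE B (Python) =====
-- def column_find_prefixed(column_name: str, prefix_list: list) -> str:
--     """Two-pass reimplementation: filter qualifying prefixes once, take the max
--     length, and return the first candidate of that length."""
--     if column_name in prefix_list:
--         return None
--     cands = [p for p in prefix_list if len(p) < len(column_name) and p in column_name]
--     if not cands:
--         return None
--     best = max(map(len, cands))
--     for p in cands:
--         if len(p) == best:
--             return p
-- ===== Notes on version B (the rewrite author's own statement) =====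
-- stated objective: alternative
-- what changed: Replaces A's single-pass max-tracking accumulator (with its truthiness-based tie logic) by a filter-then-max-then-first-match decomposition: build the candidate list once, compute the maximal length, and return the first candidate of that length.
import Mathlib
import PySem

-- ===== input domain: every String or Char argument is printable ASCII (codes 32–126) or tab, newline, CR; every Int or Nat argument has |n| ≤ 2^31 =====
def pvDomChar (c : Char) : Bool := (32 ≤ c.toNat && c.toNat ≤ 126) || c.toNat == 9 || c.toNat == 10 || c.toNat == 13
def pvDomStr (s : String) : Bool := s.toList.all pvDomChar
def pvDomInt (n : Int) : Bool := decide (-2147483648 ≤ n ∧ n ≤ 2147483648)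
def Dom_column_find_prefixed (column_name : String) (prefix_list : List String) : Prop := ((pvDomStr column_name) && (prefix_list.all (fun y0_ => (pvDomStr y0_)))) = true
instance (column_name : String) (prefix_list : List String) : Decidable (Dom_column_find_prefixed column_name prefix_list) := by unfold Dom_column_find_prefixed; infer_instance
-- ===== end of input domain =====

-- B replaces A's single-pass max-tracking accumulator by a filter / max-length / first-match
-- decomposition (alternative decomposition, same cost).

-- ===== PORT A =====
-- literal transliteration of A: accumulator loop, truthiness test 'if matched_prefix:' kept
def column_find_prefixed (column_name : String) (prefix_list : List String) : Option String :=
  let matched_prefix : Option String := none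
  if ¬ prefix_list.contains column_name then
    prefix_list.foldl (fun matched_prefix cur_prefix =>
      if (decide (PySem.Str.len cur_prefix < PySem.Str.len column_name) &&
          PySem.Str.isIn cur_prefix column_name) = true then
        match matched_prefix with
        | some m =>
            if m ≠ "" then
              (if PySem.Str.len cur_prefix > PySem.Str.len m then some cur_prefix else some m)
            else some cur_prefix
        | none => some cur_prefix
      else matched_prefix) matched_prefix
  else matched_prefix

-- ===== PORT B =====
def column_find_prefixed_alt (column_name : String) (prefix_list : List String) : Option String :=
  if prefix_list.contains column_name then none
  else
    let cands := prefix_list.filter (fun p =>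
      decide (PySem.Str.len p < PySem.Str.len column_name) && PySem.Str.isIn p column_name)
    if cands = [] then none
    else
      match PySem.List.max? (cands.map PySem.Str.len) (fun x => x) with
      | none => none   -- unreachable: cands ≠ []
      | some best => cands.find? (fun p => PySem.Str.len p == best)

-- ===== PRECONDITION & SPEC =====
def Spec_column_find_prefixed (column_name : String) (prefix_list : List String) (out : Option String) : Prop := out = column_find_prefixed_alt column_name prefix_list
instance (column_name : String) (prefix_list : List String) (out : Option String) : Decidable (Spec_column_find_prefixed column_name prefix_list out) := by unfold Spec_column_find_prefixed; infer_instance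

-- ===== CLAIM (what is proved, stated in full; the proofs are below) =====
def Claim_equal_column_find_prefixed : Prop := ∀ (column_name : String) (prefix_list : List String), Dom_column_find_prefixed column_name prefix_list → Spec_column_find_prefixed column_name prefix_list (column_find_prefixed column_name prefix_list)

-- ===== LEMMAS AND PROOFS =====

-- B's qualifying test, named for the proofs
def pvPred (col : String) (p : String) : Bool :=
  decide (PySem.Str.len p < PySem.Str.len col) && PySem.Str.isIn p col

-- A's loop body once the qualifying test has passed
def pvStep (acc : Option String) (cur : String) : Option String :=
  match acc with
  | some m =>
      if m ≠ "" then
        (if PySem.Str.len cur > PySem.Str.len m then some cur else some m)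
      else some cur
  | none => some cur

-- keep the longer of m and (the content of) r, first-wins on ties
def pvCombine (m : String) : Option String → Option String
  | none => some m
  | some x => if PySem.Str.len x > PySem.Str.len m then some x else some m

-- first element of maximal length, computed structurally (proof-only characterisation)
def pvBest : List String → Option String
  | [] => none
  | p :: cs => pvCombine p (pvBest cs)

lemma pv_len_zero (s : String) (h : PySem.Str.len s = 0) : s = "" := by
  apply String.toList_eq_nil_iff.mp
  have : (s.toList.length : Int) = 0 := by rw [← PySem.Str.len_eq]; exact h
  have hl : s.toList.length = 0 := by exact_mod_cast this
  exact List.length_eq_zero_iff.mp hl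

lemma pv_len_nonneg (s : String) : 0 ≤ PySem.Str.len s := by
  rw [PySem.Str.len_eq]; exact_mod_cast Nat.zero_le _

lemma pv_len_empty : PySem.Str.len "" = 0 := by decide

lemma pvCombine_isSome (m : String) (r : Option String) : ∃ y, pvCombine m r = some y := by
  cases r with
  | none => exact ⟨m, rfl⟩
  | some x =>
    by_cases h : PySem.Str.len x > PySem.Str.len m
    · exact ⟨x, by simp only [pvCombine]; rw [if_pos h]⟩
    · exact ⟨m, by simp only [pvCombine]; rw [if_neg h]⟩

lemma pvCombine_ge (m : String) (r : Option String) (y : String)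
    (h : pvCombine m r = some y) : PySem.Str.len m ≤ PySem.Str.len y := by
  cases r with
  | none => cases h; exact le_refl _
  | some x =>
    by_cases hx : PySem.Str.len x > PySem.Str.len m
    · simp only [pvCombine, if_pos hx] at h; cases h; omega
    · simp only [pvCombine, if_neg hx] at h; cases h; exact le_refl _

lemma pvCombine_empty' (z : String) : pvCombine "" (some z) = some z := by
  by_cases hz : PySem.Str.len z > PySem.Str.len ""
  · simp only [pvCombine]; rw [if_pos hz]
  · have h0 : PySem.Str.len z = 0 := by
      have := pv_len_nonneg z; have := pv_len_empty; omega
    rw [pv_len_zero z h0]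
    simp only [pvCombine]
    rw [if_neg (lt_irrefl _)]

lemma pvFoldStep (cs : List String) : ∀ (m : String),
    cs.foldl pvStep (some m) = pvCombine m (pvBest cs) := by
  induction cs with
  | nil => intro m; rfl
  | cons p cs ih =>
    intro m
    rw [List.foldl_cons]
    by_cases hm : m = ""
    · subst hm
      have h0 : pvStep (some "") p = some p := by simp [pvStep]
      rw [h0, ih p]
      show pvCombine p (pvBest cs) = pvCombine "" (pvBest (p :: cs))
      have hb : pvBest (p :: cs) = pvCombine p (pvBest cs) := rfl
      obtain ⟨y, hy⟩ := pvCombine_isSome p (pvBest cs)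
      rw [hy, hb, hy, pvCombine_empty' y]
    · have h0 : pvStep (some m) p =
          (if PySem.Str.len p > PySem.Str.len m then some p else some m) := by
        simp [pvStep, hm]
      rw [h0]
      by_cases hpm : PySem.Str.len p > PySem.Str.len m
      · rw [if_pos hpm, ih p]
        have hb : pvBest (p :: cs) = pvCombine p (pvBest cs) := rfl
        obtain ⟨y, hy⟩ := pvCombine_isSome p (pvBest cs)
        have hyge : PySem.Str.len p ≤ PySem.Str.len y := pvCombine_ge p _ y hy
        rw [hy, hb, hy]
        have hym : PySem.Str.len y > PySem.Str.len m := by omega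
        simp only [pvCombine]
        rw [if_pos hym]
      · rw [if_neg hpm, ih m]
        have hb : pvBest (p :: cs) = pvCombine p (pvBest cs) := rfl
        rw [hb]
        cases hr : pvBest cs with
        | none =>
          simp only [pvCombine]
          rw [if_neg hpm]
        | some x =>
          by_cases hxp : PySem.Str.len x > PySem.Str.len p
          · simp only [pvCombine, if_pos hxp]
          · simp only [pvCombine]
            rw [if_neg hxp]
            have hxm : ¬ PySem.Str.len x > PySem.Str.len m := by omega
            rw [if_neg hxm]
            show some m = if PySem.Str.len p > PySem.Str.len m then some p else some m
            rw [if_neg hpm]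

lemma pvFoldNone (cs : List String) : cs.foldl pvStep none = pvBest cs := by
  cases cs with
  | nil => rfl
  | cons p cs =>
    have h0 : pvStep none p = some p := rfl
    rw [List.foldl_cons, h0, pvFoldStep cs p]
    rfl

lemma pvFoldMax (l : List Int) : ∀ a b : Int, l.foldl max (max a b) = max a (l.foldl max b) := by
  induction l with
  | nil => intro a b; simp
  | cons c l ih =>
    intro a b
    rw [List.foldl_cons, List.foldl_cons, max_assoc, ih]

lemma pvBest_spec (cs : List String) : ∀ p : String, ∃ m : String,
    pvBest (p :: cs) = some m ∧
    (cs.map PySem.Str.len).foldl max (PySem.Str.len p) = PySem.Str.len m ∧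
    (p :: cs).find? (fun x => PySem.Str.len x == PySem.Str.len m) = some m := by
  induction cs with
  | nil =>
    intro p
    refine ⟨p, rfl, rfl, ?_⟩
    simp [List.find?]
  | cons q cs ih =>
    intro p
    obtain ⟨m', h1, h2, h3⟩ := ih q
    have hmax : ((q :: cs).map PySem.Str.len).foldl max (PySem.Str.len p)
        = max (PySem.Str.len p) (PySem.Str.len m') := by
      rw [List.map_cons, List.foldl_cons, pvFoldMax, h2]
    have hb : pvBest (p :: q :: cs) = pvCombine p (pvBest (q :: cs)) := rfl
    by_cases h : PySem.Str.len m' > PySem.Str.len p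
    · refine ⟨m', ?_, ?_, ?_⟩
      · rw [hb, h1]; simp only [pvCombine]; rw [if_pos h]
      · rw [hmax]; omega
      · have hne : (PySem.Str.len p == PySem.Str.len m') = false := by
          rw [beq_eq_false_iff_ne]; omega
        simp only [List.find?_cons, hne]
        exact h3
    · refine ⟨p, ?_, ?_, ?_⟩
      · rw [hb, h1]; simp only [pvCombine]; rw [if_neg h]
      · rw [hmax]; omega
      · have hp : (PySem.Str.len p == PySem.Str.len p) = true := by simp
        simp only [List.find?_cons, hp]

-- ===== VERDICT (by name: the statement is the Claim_ definition above) =====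
theorem column_find_prefixed_spec : Claim_equal_column_find_prefixed := by
  intro column_name prefix_list _
  unfold Spec_column_find_prefixed
  have hA : column_find_prefixed column_name prefix_list
      = if ¬ prefix_list.contains column_name then
          List.foldl (fun acc cur => if pvPred column_name cur = true then pvStep acc cur else acc)
            none prefix_list
        else none := rfl
  have hB : column_find_prefixed_alt column_name prefix_list
      = if prefix_list.contains column_name then none
        else
          if prefix_list.filter (pvPred column_name) = [] then none
          else
            match PySem.List.max? ((prefix_list.filter (pvPred column_name)).map PySem.Str.len)
                (fun x => x) with
            | none => none
            | some best =>
                (prefix_list.filter (pvPred column_name)).find?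
                  (fun p => PySem.Str.len p == best) := rfl
  rw [hA, hB]
  by_cases hc : prefix_list.contains column_name = true
  · rw [if_neg (not_not_intro hc), if_pos hc]
  · rw [if_pos hc, if_neg hc]
    rw [← List.foldl_filter, pvFoldNone]
    cases hcands : prefix_list.filter (pvPred column_name) with
    | nil => rw [if_pos rfl]; rfl
    | cons p cs =>
      rw [if_neg (List.cons_ne_nil p cs), List.map_cons, PySem.List.max?_id_cons]
      obtain ⟨m, h1, h2, h3⟩ := pvBest_spec cs p
      show pvBest (p :: cs)
          = (p :: cs).find? (fun x => PySem.Str.len x == (cs.map PySem.Str.len).foldl max (PySem.Str.len p))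
      rw [h2, h1, ← h3]
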